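-- pv_equiv track=rewrite | github.com/SysuJayce/NLP_learn | chapter4/courpus_handler.py | tag_line
-- ===== SOURCE A (Python) =====
-- def tag_line(words, mark):
--     chars = []
--     tags = []
--     temp_word = ''  # 用于合并组合词
--     for word in words:
--         word = word.strip('\t ')
--         w, h = word.split('/')
--         if len(w) == 0:
--             continue
--         if temp_word == '':
--             bracket_start = word.find('[')
--             if bracket_start == -1:  # 未找到括号[，说明不是组合词
--                 chars.extend(w)
--                 if h == 'ns':
--                     tags += ['S'] if len(w) == 1\
--                         else ['B'] + ['M'] * (len(w)-2) + ['E']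
--                 else:
--                     tags += ['O'] * len(w)
--             else:  # 找到了左括号[，进入组合词
--                 w = w[bracket_start+1:]
--                 temp_word += w
--         else:
--             bracket_end = word.find(']')
--             if bracket_end == -1:  # 未找到右括号，仍在组合词中
--                 temp_word += w
--             else:
--                 w = temp_word + w
--                 h = word[bracket_end+1:]  # 组合词结束之后会有标注
--                 chars.extend(w)
--                 if h == 'ns':
--                     tags += ['S'] if len(w) == 1\
--                         else ['B'] + ['M'] * (len(w)-2) + ['E']
--                 else:
--                     tags += ['O'] * len(w)
--                 temp_word = ''
--
--     assert temp_word == ''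
--     return chars, tags
-- ===== SOURCE B (Python) =====
-- def tag_line(words, mark):
--     # Pass 1: resolve the bracket state machine into (full_word, label) pairs.
--     pairs = []
--     temp = ''
--     for word in words:
--         word = word.strip('\t ')
--         w, h = word.split('/')
--         if not w:
--             continue
--         if temp == '':
--             i = word.find('[')
--             if i == -1:
--                 pairs.append((w, h))
--             else:
--                 temp = w[i + 1:]
--         else:
--             j = word.find(']')
--             if j == -1:
--                 temp += w
--             else:
--                 pairs.append((temp + w, word[j + 1:]))
--                 temp = ''
--     assert temp == ''
--     # Pass 2: flatten into characters and tags via one shared tagging rule.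
--     chars = [c for w, _ in pairs for c in w]
--     tags = [t for w, h in pairs for t in _tags_for(w, h)]
--     return chars, tags
--
--
-- def _tags_for(w, h):
--     if h != 'ns':
--         return ['O'] * len(w)
--     return ['S'] if len(w) == 1 else ['B'] + ['M'] * (len(w) - 2) + ['E']
-- ===== Notes on version B (the rewrite author's own statement) =====
-- stated objective: simpler
-- what changed: Replaces A's single loop that interleaves bracket-state tracking with tag emission (duplicating the BMES/O block) by two passes: a first pass resolving the words into (full_word, label) pairs, then a flattening pass that emits chars and tags through one shared tagging helper.
import Mathlib
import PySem

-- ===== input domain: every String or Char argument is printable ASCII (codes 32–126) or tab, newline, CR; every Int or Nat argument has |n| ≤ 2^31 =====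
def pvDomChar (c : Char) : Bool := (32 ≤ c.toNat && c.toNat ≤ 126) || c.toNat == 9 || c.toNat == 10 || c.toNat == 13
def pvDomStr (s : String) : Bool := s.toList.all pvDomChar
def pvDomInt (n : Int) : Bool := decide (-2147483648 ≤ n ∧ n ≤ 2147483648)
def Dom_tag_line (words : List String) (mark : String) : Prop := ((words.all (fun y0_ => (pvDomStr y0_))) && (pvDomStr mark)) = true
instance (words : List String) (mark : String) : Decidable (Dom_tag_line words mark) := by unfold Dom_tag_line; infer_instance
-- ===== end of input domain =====

-- B replaces A's single loop (which interleaves bracket-state tracking with tag emission,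
-- duplicating the BMES/O block) by two passes: resolve (word, label) pairs, then flatten
-- them through one shared tagging helper.  Objective: simpler; same cost.

-- ===== PORT A =====
-- one step of A's for-loop; state = (chars, tags, temp_word).
-- A raises ValueError when word.split('/') has ≠ 2 pieces: that case (excluded by Pre_) leaves the state unchanged.
def tagLineStepA (st : List String × List String × List Char) (word0 : String) :
    List String × List String × List Char :=
  let chars := st.1; let tags := st.2.1; let temp := st.2.2
  let word := PySem.Chars.stripChars word0.toList ['\t', ' ']   -- word.strip('\t ')
  match PySem.Chars.splitOn word ['/'] with
  | [w, h] =>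
    if w.length = 0 then (chars, tags, temp)                    -- continue
    else if temp = [] then
      let bs := PySem.Chars.find word ['[']
      if bs = -1 then
        (chars ++ w.map (fun c => String.mk [c]),               -- chars.extend(w)
         tags ++ (if h = ['n', 's'] then
                    (if w.length = 1 then ["S"]
                     else ["B"] ++ List.replicate (w.length - 2) "M" ++ ["E"])
                  else List.replicate w.length "O"),
         temp)
      else
        (chars, tags, temp ++ PySem.List.slice w (some (bs + 1)) none)  -- temp_word += w[bs+1:]
    else
      let be := PySem.Chars.find word [']']
      if be = -1 then (chars, tags, temp ++ w)                  -- temp_word += w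
      else
        let w' := temp ++ w
        let h' := PySem.List.slice word (some (be + 1)) none    -- h = word[be+1:]
        (chars ++ w'.map (fun c => String.mk [c]),
         tags ++ (if h' = ['n', 's'] then
                    (if w'.length = 1 then ["S"]
                     else ["B"] ++ List.replicate (w'.length - 2) "M" ++ ["E"])
                  else List.replicate w'.length "O"),
         [])
  | _ => (chars, tags, temp)

def tag_line (words : List String) (mark : String) : List String × List String :=
  let st := words.foldl tagLineStepA ([], [], [])
  (st.1, st.2.1)   -- the final 'assert temp_word == ""' is Pre_'s to exclude

-- ===== PORT B =====
-- the shared tagging rule (_tags_for in Source B)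
def pvTagsFor (w : List Char) (h : List Char) : List String :=
  if h ≠ ['n', 's'] then List.replicate w.length "O"
  else if w.length = 1 then ["S"]
  else ["B"] ++ List.replicate (w.length - 2) "M" ++ ["E"]

-- pass 1 step: state = (pairs, temp); a ≠2-piece split (excluded by Pre_) leaves the state unchanged.
def pvResolveStep (st : List (List Char × List Char) × List Char) (word0 : String) :
    List (List Char × List Char) × List Char :=
  let pairs := st.1; let temp := st.2
  let word := PySem.Chars.stripChars word0.toList ['\t', ' ']
  match PySem.Chars.splitOn word ['/'] with
  | [w, h] =>
    if w.length = 0 then (pairs, temp)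
    else if temp = [] then
      let i := PySem.Chars.find word ['[']
      if i = -1 then (pairs ++ [(w, h)], temp)
      else (pairs, PySem.List.slice w (some (i + 1)) none)
    else
      let j := PySem.Chars.find word [']']
      if j = -1 then (pairs, temp ++ w)
      else (pairs ++ [(temp ++ w, PySem.List.slice word (some (j + 1)) none)], [])
  | _ => (pairs, temp)

def tag_line_alt (words : List String) (mark : String) : List String × List String :=
  let pairs := (words.foldl pvResolveStep ([], [])).1
  (pairs.flatMap (fun p => p.1.map (fun c => String.mk [c])),
   pairs.flatMap (fun p => pvTagsFor p.1 p.2))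

-- ===== PRECONDITION & SPEC =====
-- abstract bracket state: Bool = "temp_word is nonempty"; tracks only validity, not output
def pvPreStep (inTemp : Bool) (word0 : String) : Bool :=
  let word := PySem.Chars.stripChars word0.toList ['\t', ' ']
  match PySem.Chars.splitOn word ['/'] with
  | [w, _] =>
    if w.length = 0 then inTemp
    else if inTemp then PySem.Chars.find word [']'] = -1
    else if PySem.Chars.find word ['['] = -1 then false
    else PySem.List.slice w (some (PySem.Chars.find word ['['] + 1)) none ≠ []
  | _ => inTemp

-- Pre_ excludes exactly the inputs where the Python A raises: a ValueError when some word
-- (after strip) does not split on '/' into exactly two pieces, and the final AssertionError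
-- when an opened combined word ('[') is never closed (temp_word ≠ '' at the end).
def Pre_tag_line (words : List String) (mark : String) : Prop :=
  (∀ w ∈ words, (PySem.Chars.splitOn (PySem.Chars.stripChars w.toList ['\t', ' ']) ['/']).length = 2)
  ∧ words.foldl pvPreStep false = false
instance (words : List String) (mark : String) : Decidable (Pre_tag_line words mark) := by
  unfold Pre_tag_line; infer_instance

def pvWitness_tag_line : List String × String := (["[ab/x", "c/y]ns", "de/m"], "ns")

def Spec_tag_line (words : List String) (mark : String) (out : List String × List String) : Prop := out = tag_line_alt words mark
instance (words : List String) (mark : String) (out : List String × List String) : Decidable (Spec_tag_line words mark out) := by unfold Spec_tag_line; infer_instance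

-- ===== CLAIM (what is proved, stated in full; the proofs are below) =====
def Claim_equal_tag_line : Prop := ∀ (words : List String) (mark : String), Dom_tag_line words mark → Pre_tag_line words mark → Spec_tag_line words mark (tag_line words mark)

-- ===== LEMMAS AND PROOFS =====

-- the flattening of a pair list into (chars, tags), as B's pass 2 does
def pvFlatC (pairs : List (List Char × List Char)) : List String :=
  pairs.flatMap (fun p => p.1.map (fun c => String.mk [c]))
def pvFlatT (pairs : List (List Char × List Char)) : List String :=
  pairs.flatMap (fun p => pvTagsFor p.1 p.2)

-- one A-step, seen through B's state abstraction
lemma stepA_eq (c t : List String) (pairs : List (List Char × List Char)) (temp : List Char)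
    (word0 : String) :
    tagLineStepA (c ++ pvFlatC pairs, t ++ pvFlatT pairs, temp) word0 =
      (c ++ pvFlatC (pvResolveStep (pairs, temp) word0).1,
       t ++ pvFlatT (pvResolveStep (pairs, temp) word0).1,
       (pvResolveStep (pairs, temp) word0).2) := by
  unfold tagLineStepA pvResolveStep
  rcases h : PySem.Chars.splitOn (PySem.Chars.stripChars word0.toList ['\t', ' ']) ['/'] with
    _ | ⟨w, _ | ⟨hh, _ | _⟩⟩ <;>
    simp only [] <;>
    split_ifs <;>
    simp_all [pvFlatC, pvFlatT, pvTagsFor] <;>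
    split_ifs <;>
    simp_all [List.flatMap_append]

lemma foldA_eq (words : List String) :
    ∀ (c t : List String) (pairs : List (List Char × List Char)) (temp : List Char),
    words.foldl tagLineStepA (c ++ pvFlatC pairs, t ++ pvFlatT pairs, temp) =
      (c ++ pvFlatC (words.foldl pvResolveStep (pairs, temp)).1,
       t ++ pvFlatT (words.foldl pvResolveStep (pairs, temp)).1,
       (words.foldl pvResolveStep (pairs, temp)).2) := by
  induction words with
  | nil => intro c t pairs temp; simp [List.foldl]
  | cons w ws ih =>
    intro c t pairs temp
    simp only [List.foldl, stepA_eq]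
    exact ih c t _ _

-- ===== VERDICT (by name: the statement is the Claim_ definition above) =====
theorem tag_line_spec : Claim_equal_tag_line := by
  intro words mark _ _
  unfold Spec_tag_line tag_line tag_line_alt
  have h := foldA_eq words [] [] [] []
  simp only [pvFlatC, pvFlatT, List.flatMap_nil, List.append_nil, List.nil_append] at h ⊢
  rw [h]
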